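-- pv_equiv track=rewrite | github.com/apraveena/Interview_Prep_SecondRound | Other Problems/questionMarks.py | all_good
-- ===== SOURCE A (Python) =====
-- def all_good(s):
--     first_digit = ""
--     second_digit = ""
--     qm_count = 0
--     if "?" not in s:
--         return False
--     for ltr in s:
--         if ltr.isdigit():
--             if first_digit == "":
--                 first_digit = ltr
--             else:
--                 second_digit = ltr
--                 if qm_count == 3:
--                     if int(first_digit) + int(second_digit) == 10:
--                         # all good reset values and continue testing
--                         first_digit = second_digit
--                         second_digit = ""
--                         qm_count = 0
--                     else:
--                         return False
--                 else:
--                     first_digit = second_digit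
--                     second_digit = ""
--                     qm_count = 0
--
--         elif ltr == "?" and first_digit != "":
--             qm_count += 1
--             if qm_count > 3:
--                 #reset
--                 first_digit = ""
--                 second_digit = ""
--                 qm_count = 0
--
--
--
--     return True
-- ===== SOURCE B (Python) =====
-- def all_good(s):
--     if "?" not in s:
--         return False
--     digits = []   # digit characters, in order
--     gaps = []     # gaps[i] = number of '?' seen between digit i-1 and digit i
--     q = 0
--     for c in s:
--         if c.isdigit():
--             digits.append(c)
--             gaps.append(q)
--             q = 0
--         elif c == "?":
--             q += 1
--     return all(g != 3 or int(a) + int(b) == 10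
--                for a, b, g in zip(digits, digits[1:], gaps[1:]))
-- ===== Notes on version B (the rewrite author's own statement) =====
-- stated objective: simpler
-- what changed: A's single-pass five-variable state machine (first_digit/second_digit/qm_count with in-loop resets and early returns) is replaced by a two-phase decomposition: one pass collects the digit characters and the question-mark gap preceding each digit, then consecutive digit pairs whose gap is exactly 3 are checked to sum to 10.
import Mathlib
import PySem

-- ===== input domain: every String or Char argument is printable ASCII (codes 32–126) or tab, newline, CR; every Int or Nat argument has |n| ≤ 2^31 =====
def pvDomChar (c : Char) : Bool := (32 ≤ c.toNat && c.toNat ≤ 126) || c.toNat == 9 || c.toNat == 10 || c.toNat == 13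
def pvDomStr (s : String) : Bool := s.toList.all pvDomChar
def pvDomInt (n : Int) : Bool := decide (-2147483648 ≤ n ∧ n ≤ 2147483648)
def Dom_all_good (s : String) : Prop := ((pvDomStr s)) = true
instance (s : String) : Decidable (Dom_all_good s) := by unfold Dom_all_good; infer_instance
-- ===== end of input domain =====

-- B replaces A's five-variable state machine by a simpler decomposition: one pass collecting the
-- digit characters and the question-mark gap before each digit, then a check over consecutive digit pairs.

-- ===== PORT A =====
-- int(d) for a stored one-character digit string; ofChars? is some on every ASCII digit char,
-- so the getD default is never reached on the admitted domain.
def pvValA (c : Char) : Int := (PySem.Int.ofChars? [c]).getD 0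

-- the for-loop of A, state = (first_digit, second_digit, qm_count); "" is modelled as none
def pvLoopA : List Char → Option Char → Option Char → Int → Bool
  | [], _, _, _ => true
  | c :: rest, fd, sd, qc =>
    if PySem.Chars.isdigit c then
      match fd with
      | none => pvLoopA rest (some c) sd qc
      | some f =>
        let sd' := c
        if qc == 3 then
          if pvValA f + pvValA sd' == 10 then pvLoopA rest (some sd') none 0
          else false
        else pvLoopA rest (some sd') none 0
    else if c == '?' && fd.isSome then
      if qc + 1 > 3 then pvLoopA rest none none 0
      else pvLoopA rest fd sd (qc + 1)
    else pvLoopA rest fd sd qc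

def all_good (s : String) : Bool :=
  if !PySem.Str.isIn "?" s then false
  else pvLoopA s.toList none none 0

-- ===== PORT B =====
def pvValB (c : Char) : Int := (PySem.Int.ofChars? [c]).getD 0

-- one step of B's collecting loop, state = (digits, gaps, q)
def pvCollectStep (st : List Char × List Int × Int) (c : Char) : List Char × List Int × Int :=
  if PySem.Chars.isdigit c then (st.1 ++ [c], st.2.1 ++ [st.2.2], 0)
  else if c == '?' then (st.1, st.2.1, st.2.2 + 1)
  else st

def all_good_alt (s : String) : Bool :=
  if !PySem.Str.isIn "?" s then false
  else
    let r := s.toList.foldl pvCollectStep ([], [], 0)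
    let ds := r.1
    let gs := r.2.1
    (ds.zip (ds.tail.zip gs.tail)).all (fun x => x.2.2 != 3 || pvValB x.1 + pvValB x.2.1 == 10)

-- ===== PRECONDITION & SPEC =====
def Spec_all_good (s : String) (out : Bool) : Prop := out = all_good_alt s
instance (s : String) (out : Bool) : Decidable (Spec_all_good s out) := by unfold Spec_all_good; infer_instance

-- ===== CLAIM (what is proved, stated in full; the proofs are below) =====
def Claim_equal_all_good : Prop := ∀ (s : String), Dom_all_good s → Spec_all_good s (all_good s)

-- ===== LEMMAS AND PROOFS =====

-- structural version of B's collecting loop: digits and gaps built front-to-back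
def pvCollectR : List Char → Int → List Char × List Int
  | [], _ => ([], [])
  | c :: rest, q =>
    if PySem.Chars.isdigit c then
      ((pvCollectR rest 0).1.cons c, (pvCollectR rest 0).2.cons q)
    else if c == '?' then pvCollectR rest (q + 1)
    else pvCollectR rest q

-- the final q of B's fold (only needed to state the fold/recursion bridge)
def pvQFinal : List Char → Int → Int
  | [], q => q
  | c :: rest, q =>
    if PySem.Chars.isdigit c then pvQFinal rest 0
    else if c == '?' then pvQFinal rest (q + 1)
    else pvQFinal rest q

theorem pvVal_eq (c : Char) : pvValB c = pvValA c := rfl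

def pvPairOK (a b : Char) (g : Int) : Bool := g != 3 || pvValB a + pvValB b == 10

def pvCheck (ds : List Char) (gs : List Int) : Bool :=
  (ds.zip (ds.tail.zip gs.tail)).all (fun x => pvPairOK x.1 x.2.1 x.2.2)

def pvB (cs : List Char) (q : Int) : Bool := pvCheck (pvCollectR cs q).1 (pvCollectR cs q).2

theorem pvFold_eq (cs : List Char) : ∀ (ds : List Char) (gs : List Int) (q : Int),
    cs.foldl pvCollectStep (ds, gs, q)
      = (ds ++ (pvCollectR cs q).1, gs ++ (pvCollectR cs q).2, pvQFinal cs q) := by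
  induction cs with
  | nil => intro ds gs q; simp [pvCollectR, pvQFinal]
  | cons c rest ih =>
    intro ds gs q
    simp only [List.foldl_cons, pvCollectStep, pvCollectR, pvQFinal]
    by_cases h : PySem.Chars.isdigit c
    · simp [h, ih]
    · by_cases h2 : c = '?'
      · subst h2; simp [h, ih]
      · simp [h, h2, ih]

theorem pvDigits_indep (cs : List Char) : ∀ q q' : Int,
    (pvCollectR cs q).1 = (pvCollectR cs q').1 := by
  induction cs with
  | nil => intro q q'; simp [pvCollectR]
  | cons c rest ih =>
    intro q q'
    simp only [pvCollectR]
    by_cases h : PySem.Chars.isdigit c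
    · simp [h]
    · by_cases h2 : c = '?'
      · subst h2
        rw [if_neg (by decide), if_pos (by decide), if_neg (by decide), if_pos (by decide)]
        exact ih (q + 1) (q' + 1)
      · rw [if_neg (by simp [h]), if_neg (by simp [h2]), if_neg (by simp [h]),
          if_neg (by simp [h2])]
        exact ih q q'

theorem pvGapsTail_indep (cs : List Char) : ∀ q q' : Int,
    (pvCollectR cs q).2.tail = (pvCollectR cs q').2.tail := by
  induction cs with
  | nil => intro q q'; simp [pvCollectR]
  | cons c rest ih =>
    intro q q'
    simp only [pvCollectR]
    by_cases h : PySem.Chars.isdigit c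
    · simp [h]
    · by_cases h2 : c = '?'
      · subst h2
        rw [if_neg (by decide), if_pos (by decide), if_neg (by decide), if_pos (by decide)]
        exact ih (q + 1) (q' + 1)
      · rw [if_neg (by simp [h]), if_neg (by simp [h2]), if_neg (by simp [h]),
          if_neg (by simp [h2])]
        exact ih q q'

theorem pvGapsHead_ge (cs : List Char) : ∀ (q g : Int),
    (pvCollectR cs q).2.head? = some g → q ≤ g := by
  induction cs with
  | nil => intro q g h; simp [pvCollectR] at h
  | cons c rest ih =>
    intro q g h
    simp only [pvCollectR] at h
    by_cases hd : PySem.Chars.isdigit c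
    · simp [hd] at h; omega
    · by_cases h2 : c = '?'
      · subst h2
        rw [if_neg (by simp [hd]), if_pos (by simp)] at h
        have := ih (q + 1) g h; omega
      · rw [if_neg (by simp [hd]), if_neg (by simp [h2])] at h
        exact ih q g h

-- pvCheck only looks at gs.tail
theorem pvCheck_tail_congr (ds : List Char) (gs gs' : List Int) (h : gs.tail = gs'.tail) :
    pvCheck ds gs = pvCheck ds gs' := by
  simp [pvCheck, h]

-- pvB does not depend on the initial q
theorem pvB_indep (cs : List Char) (q q' : Int) : pvB cs q = pvB cs q' := by
  unfold pvB
  rw [pvDigits_indep cs q q', pvCheck_tail_congr _ _ _ (pvGapsTail_indep cs q q')]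

-- dropping a leading digit whose following gap cannot be 3
theorem pvCheck_drop (f : Char) (g0 : Int) (ds : List Char) (gs : List Int)
    (h : ∀ g, gs.head? = some g → g ≠ 3) :
    pvCheck (f :: ds) (g0 :: gs) = pvCheck ds gs := by
  cases ds with
  | nil => cases gs <;> simp [pvCheck]
  | cons d ds₂ =>
    cases gs with
    | nil => simp [pvCheck]
    | cons g1 gs₂ =>
      have hg : g1 ≠ 3 := h g1 rfl
      simp [pvCheck, pvPairOK, hg]

-- a cons step of pvCheck
theorem pvCheck_cons (f d : Char) (ds : List Char) (g0 g1 : Int) (gs : List Int) :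
    pvCheck (f :: d :: ds) (g0 :: g1 :: gs)
      = (pvPairOK f d g1 && pvCheck (d :: ds) (g1 :: gs)) := by
  simp [pvCheck]

-- the main invariant: A's loop against B's collected lists
theorem pvMain (cs : List Char) :
    (∀ sd, pvLoopA cs none sd 0 = pvB cs 0) ∧
    (∀ (f : Char) (sd : Option Char) (q g0 : Int), 0 ≤ q → q ≤ 3 →
      pvLoopA cs (some f) sd q
        = pvCheck (f :: (pvCollectR cs q).1) (g0 :: (pvCollectR cs q).2)) := by
  induction cs with
  | nil =>
    constructor
    · intro sd; simp [pvLoopA, pvB, pvCollectR, pvCheck]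
    · intro f sd q g0 _ _; simp [pvLoopA, pvCollectR, pvCheck]
  | cons c rest ih =>
    obtain ⟨ihN, ihS⟩ := ih
    constructor
    · -- fd = none, qc = 0
      intro sd
      simp only [pvLoopA]
      by_cases hd : PySem.Chars.isdigit c
      · rw [if_pos hd, ihS c sd 0 0 le_rfl (by norm_num)]
        unfold pvB
        have hcol : pvCollectR (c :: rest) 0
            = (c :: (pvCollectR rest 0).1, 0 :: (pvCollectR rest 0).2) := by
          simp [pvCollectR, hd]
        rw [hcol]
      · by_cases h2 : c = '?'
        · subst h2
          rw [if_neg (by simp [hd]), if_neg (by simp), ihN sd, pvB_indep rest 0 1]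
          unfold pvB
          have hcol : pvCollectR ('?' :: rest) 0 = pvCollectR rest 1 := by
            simp [pvCollectR, hd]
          rw [hcol]
        · rw [if_neg (by simp [hd]), if_neg (by simp), ihN sd]
          unfold pvB
          have hcol : pvCollectR (c :: rest) 0 = pvCollectR rest 0 := by
            simp [pvCollectR, hd, h2]
          rw [hcol]
    · intro f sd q g0 hq0 hq3
      simp only [pvLoopA]
      by_cases hd : PySem.Chars.isdigit c
      · -- digit: check the pair (f, c) with gap q, continue with (c, 0)
        have hrec := ihS c none 0 q le_rfl (by norm_num)
        have hcol : pvCollectR (c :: rest) q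
            = (c :: (pvCollectR rest 0).1, q :: (pvCollectR rest 0).2) := by
          simp [pvCollectR, hd]
        rw [if_pos hd, hcol,
          pvCheck_cons f c (pvCollectR rest 0).1 g0 q (pvCollectR rest 0).2, ← hrec]
        by_cases h3 : q = 3
        · subst h3
          rw [if_pos (by decide)]
          by_cases hsum : pvValA f + pvValA c = 10
          · rw [if_pos (by simp [hsum])]
            simp [pvPairOK, pvVal_eq, hsum]
          · rw [if_neg (by simp [hsum])]
            simp [pvPairOK, pvVal_eq, hsum]
        · rw [if_neg (show ¬ ((q == 3) = true) by simp [h3])]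
          have : pvPairOK f c q = true := by simp [pvPairOK, h3]
          simp [this]
      · by_cases h2 : c = '?'
        · subst h2
          rw [if_neg (by simp [hd]), if_pos (by simp)]
          have hcol : pvCollectR ('?' :: rest) q = pvCollectR rest (q + 1) := by
            simp [pvCollectR, hd]
          rw [hcol]
          by_cases h3 : q = 3
          · subst h3
            rw [if_pos (by norm_num), ihN none, pvB_indep rest 0 4]
            show pvB rest 4 = _
            unfold pvB
            rw [pvCheck_drop f g0 _ _ (fun g hg => by have := pvGapsHead_ge rest 4 g hg; omega)]
            norm_num
          · rw [if_neg (by omega), ihS f sd (q + 1) g0 (by omega) (by omega)]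
        · rw [if_neg (by simp [hd]), if_neg (by simp [h2]),
            ihS f sd q g0 hq0 hq3]
          have hcol : pvCollectR (c :: rest) q = pvCollectR rest q := by
            simp [pvCollectR, hd, h2]
          rw [hcol]

-- ===== VERDICT (by name: the statement is the Claim_ definition above) =====
theorem all_good_spec : Claim_equal_all_good := by
  intro s _
  unfold Spec_all_good all_good all_good_alt
  cases hb : PySem.Str.isIn "?" s with
  | false => rfl
  | true =>
    simp only [Bool.not_true, Bool.false_eq_true, if_false]
    rw [(pvMain s.toList).1 none, pvFold_eq s.toList [] [] 0]
    simp [pvB, pvCheck, pvPairOK]
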